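-- pv_equiv track=rewrite | github.com/KevinNitroG/My-Scripts | scripts/Subtitle Fix Syntax/Subtitle Fix Syntax.py | upper_the_first_character_of_the_line
-- ===== SOURCE A (Python) =====
-- def upper_the_first_character_of_the_line(arr, subtitle_index_arr):
--     modified_arr = []
--     for line_index in range(0,len(arr)):
--         line = arr[line_index]
--         if line_index in subtitle_index_arr:
--             line = line.capitalize()
--         modified_arr.append(line)
--     return modified_arr
-- ===== SOURCE B (Python) =====
-- def upper_the_first_character_of_the_line(arr, subtitle_index_arr):
--     modified = list(arr)
--     n = len(arr)
--     for i in subtitle_index_arr: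
--         if 0 <= i < n:
--             modified[i] = modified[i].capitalize()
--     return modified
-- ===== Notes on version B (the rewrite author's own statement) =====
-- stated objective: faster
-- what changed: Instead of scanning every line and testing its index for membership in subtitle_index_arr, B copies the list once and visits only the flagged indices, capitalizing in place (guarding 0<=i<len to match A's silent ignoring of out-of-range indices).
import Mathlib
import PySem

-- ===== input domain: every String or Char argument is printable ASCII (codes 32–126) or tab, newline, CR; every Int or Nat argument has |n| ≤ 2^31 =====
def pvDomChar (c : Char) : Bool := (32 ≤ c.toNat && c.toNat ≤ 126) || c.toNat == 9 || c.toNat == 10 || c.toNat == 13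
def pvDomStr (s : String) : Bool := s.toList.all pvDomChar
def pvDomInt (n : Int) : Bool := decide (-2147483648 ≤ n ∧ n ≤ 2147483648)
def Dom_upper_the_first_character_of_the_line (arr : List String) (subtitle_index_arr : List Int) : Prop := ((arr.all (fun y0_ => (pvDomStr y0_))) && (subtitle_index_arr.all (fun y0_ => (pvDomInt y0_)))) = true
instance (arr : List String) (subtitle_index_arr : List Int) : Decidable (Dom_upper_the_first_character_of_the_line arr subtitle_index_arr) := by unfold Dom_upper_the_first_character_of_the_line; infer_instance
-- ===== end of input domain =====

-- B copies the list once and capitalizes in place only at the flagged in-range indices, instead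
-- of testing every line's index for membership in subtitle_index_arr.

-- str.capitalize(): first char uppercased, the rest lowercased (exact on the ASCII domain)
def pyCapitalize (s : String) : String :=
  match s.toList with
  | [] => s
  | c :: rest => String.ofList (PySem.Chars.upperChar c :: rest.map PySem.Chars.lowerChar)

-- ===== PORT A =====
def upper_the_first_character_of_the_line (arr : List String) (subtitle_index_arr : List Int) : List String :=
  (PySem.List.pyRange 0 arr.length 1).foldl
    (fun modified_arr line_index =>
      let line := PySem.List.pyGetD arr line_index ""
      modified_arr ++ [if subtitle_index_arr.contains line_index then pyCapitalize line else line])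
    []

-- ===== PORT B =====
def upper_the_first_character_of_the_line_alt (arr : List String) (subtitle_index_arr : List Int) : List String :=
  subtitle_index_arr.foldl
    (fun modified i =>
      if 0 ≤ i ∧ i < (arr.length : Int) then modified.modify i.toNat pyCapitalize else modified)
    arr

-- ===== PRECONDITION & SPEC =====
def Spec_upper_the_first_character_of_the_line (arr : List String) (subtitle_index_arr : List Int) (out : List String) : Prop := out = upper_the_first_character_of_the_line_alt arr subtitle_index_arr
instance (arr : List String) (subtitle_index_arr : List Int) (out : List String) : Decidable (Spec_upper_the_first_character_of_the_line arr subtitle_index_arr out) := by unfold Spec_upper_the_first_character_of_the_line; infer_instance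

-- ===== CLAIM (what is proved, stated in full; the proofs are below) =====
def Claim_equal_upper_the_first_character_of_the_line : Prop := ∀ (arr : List String) (subtitle_index_arr : List Int), Dom_upper_the_first_character_of_the_line arr subtitle_index_arr → Spec_upper_the_first_character_of_the_line arr subtitle_index_arr (upper_the_first_character_of_the_line arr subtitle_index_arr)

-- ===== LEMMAS AND PROOFS =====

theorem charOfNat_val_toNat {n : Nat} (h : n.isValidChar) : (Char.ofNat n).val.toNat = n := by
  simp only [Char.ofNat, h, dif_pos]; rfl


theorem upperChar_idem (c : Char) : PySem.Chars.upperChar (PySem.Chars.upperChar c) = PySem.Chars.upperChar c := by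
  simp only [PySem.Chars.upperChar, PySem.Chars.islower]
  split
  · next h =>
    simp only [Bool.and_eq_true, decide_eq_true_eq, Char.le_def] at h
    have h1 : 97 ≤ c.toNat := UInt32.le_iff_toNat_le.mp h.1
    have h2 : c.toNat ≤ 122 := UInt32.le_iff_toNat_le.mp h.2
    have hv : (c.toNat - 32).isValidChar := Or.inl (by omega)
    rw [if_neg]
    simp only [Bool.and_eq_true, decide_eq_true_eq, Char.le_def, not_and]
    intro ha hz
    have t1 := UInt32.le_iff_toNat_le.mp ha
    have t2 := UInt32.le_iff_toNat_le.mp hz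
    rw [charOfNat_val_toNat hv] at t1
    have e1 : ('a').val.toNat = 97 := rfl
    simp only [Char.toNat] at *
    omega
  · rfl


theorem lowerChar_idem (c : Char) : PySem.Chars.lowerChar (PySem.Chars.lowerChar c) = PySem.Chars.lowerChar c := by
  simp only [PySem.Chars.lowerChar, PySem.Chars.isupper]
  split
  · next h =>
    simp only [Bool.and_eq_true, decide_eq_true_eq, Char.le_def] at h
    have h1 : 65 ≤ c.toNat := UInt32.le_iff_toNat_le.mp h.1
    have h2 : c.toNat ≤ 90 := UInt32.le_iff_toNat_le.mp h.2
    have hv : (c.toNat + 32).isValidChar := Or.inl (by omega)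
    rw [if_neg]
    simp only [Bool.and_eq_true, decide_eq_true_eq, Char.le_def, not_and]
    intro ha hz
    have t2 := UInt32.le_iff_toNat_le.mp hz
    rw [charOfNat_val_toNat hv] at t2
    have e1 : ('Z').val.toNat = 90 := rfl
    simp only [Char.toNat] at *
    omega
  · rfl


theorem pyCapitalize_idem (s : String) : pyCapitalize (pyCapitalize s) = pyCapitalize s := by
  unfold pyCapitalize
  cases h : s.toList with
  | nil => simp [h]
  | cons c rest =>
    simp only [String.toList_ofList, List.map_map]
    rw [upperChar_idem]
    simp [List.map_congr_left, Function.comp, lowerChar_idem]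


theorem altFold_getElem? (n : Nat) (idxs : List Int) (m : List String) (j : Nat) :
    (idxs.foldl (fun modified i =>
      if 0 ≤ i ∧ i < (n : Int) then modified.modify i.toNat pyCapitalize else modified) m)[j]? =
    if (j : Int) ∈ idxs ∧ j < n then m[j]?.map pyCapitalize else m[j]? := by
  induction idxs generalizing m with
  | nil => simp
  | cons i rest ih =>
    simp only [List.foldl_cons, ih, List.mem_cons]
    by_cases hg : 0 ≤ i ∧ i < (n : Int)
    · rw [if_pos hg]
      by_cases hij : i = (j : Int)
      · have hjt : i.toNat = j := by omega
        have hjn : j < n := by omega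
        rw [List.getElem?_modify, hjt]
        by_cases hr : (j : Int) ∈ rest
        · rw [if_pos ⟨hr, hjn⟩, if_pos ⟨Or.inr hr, hjn⟩]
          cases m[j]? with
          | none => rfl
          | some v => simp [pyCapitalize_idem]
        · rw [if_neg (fun h => hr h.1), if_pos ⟨Or.inl hij.symm, hjn⟩]
          cases m[j]? with
          | none => rfl
          | some v => simp
      · have hmm : (m.modify i.toNat pyCapitalize)[j]? = m[j]? := by
          rw [List.getElem?_modify]
          have hne : i.toNat ≠ j := by omega
          cases m[j]? with
          | none => rfl
          | some v => simp [hne]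
        rw [hmm]
        have heq : (((j : Int) = i ∨ (j : Int) ∈ rest) ∧ j < n) ↔ ((j : Int) ∈ rest ∧ j < n) := by
          constructor
          · rintro ⟨h | h, hn⟩
            · exact absurd h.symm hij
            · exact ⟨h, hn⟩
          · rintro ⟨h, hn⟩
            exact ⟨Or.inr h, hn⟩
        rw [if_congr heq rfl rfl]
    · rw [if_neg hg]
      have heq : (((j : Int) = i ∨ (j : Int) ∈ rest) ∧ j < n) ↔ ((j : Int) ∈ rest ∧ j < n) := by
        constructor
        · rintro ⟨h | h, hn⟩
          · exact absurd ⟨by omega, by omega⟩ hg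
          · exact ⟨h, hn⟩
        · rintro ⟨h, hn⟩
          exact ⟨Or.inr h, hn⟩
      rw [if_congr heq rfl rfl]


theorem aFold_eq_map (arr : List String) (idxs : List Int) :
    upper_the_first_character_of_the_line arr idxs =
      (List.range arr.length).map (fun k =>
        if idxs.contains ((k : Nat) : Int) then pyCapitalize (arr.getD k "") else arr.getD k "") := by
  unfold upper_the_first_character_of_the_line
  rw [PySem.List.pyRange_one]
  have base : ∀ (l : List Int) (acc : List String),
      l.foldl (fun modified_arr line_index =>
        let line := PySem.List.pyGetD arr line_index ""
        modified_arr ++ [if idxs.contains line_index then pyCapitalize line else line]) acc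
      = acc ++ l.map (fun line_index =>
          if idxs.contains line_index then pyCapitalize (PySem.List.pyGetD arr line_index "")
          else PySem.List.pyGetD arr line_index "") := by
    intro l
    induction l with
    | nil => simp
    | cons x xs ih =>
      intro acc
      simp only [List.foldl_cons, ih, List.map_cons]
      simp
  rw [base]
  simp [List.map_map, Function.comp, PySem.List.pyGetD_natCast]


theorem ports_agree (arr : List String) (idxs : List Int) : upper_the_first_character_of_the_line arr idxs = upper_the_first_character_of_the_line_alt arr idxs := by
  rw [aFold_eq_map]
  unfold upper_the_first_character_of_the_line_alt
  apply List.ext_getElem?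
  intro j
  rw [altFold_getElem?]
  by_cases hj : j < arr.length
  · rw [List.getElem?_map, List.getElem?_range hj, List.getElem?_eq_getElem hj]
    have hgetD : arr.getD j "" = arr[j] := by
      simp [List.getD, List.getElem?_eq_getElem hj]
    by_cases hm : (j : Int) ∈ idxs
    · have hc : idxs.contains ((j : Nat) : Int) = true := by simpa using hm
      rw [if_pos ⟨hm, hj⟩]
      simp [hm, List.getElem?_eq_getElem hj]
    · have hc : idxs.contains ((j : Nat) : Int) = false := by simpa using hm
      rw [if_neg (fun h => hm h.1)]
      simp [hm, List.getElem?_eq_getElem hj]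
  · rw [if_neg (fun h => hj h.2)]
    rw [List.getElem?_eq_none (by simp; omega), List.getElem?_eq_none (by simpa using hj)]

-- ===== VERDICT (by name: the statement is the Claim_ definition above) =====
theorem upper_the_first_character_of_the_line_spec : Claim_equal_upper_the_first_character_of_the_line := by
  intro arr idxs _
  exact ports_agree arr idxs
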